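-- pv_equiv track=rewrite | github.com/klei22/nanoGPT | data/han_decomp/v0/han_file_decomp_map_common.py | count_newline_kinds
-- ===== SOURCE A (Python) =====
-- from typing import Dict, Iterable, Iterator, List, Optional, Sequence, Tuple
--
-- def count_newline_kinds(text: str) -> Dict[str, int]:
--     counts = {"CRLF": 0, "LF": 0, "CR": 0}
--     i = 0
--     while i < len(text):
--         ch = text[i]
--         if ch == "\r":
--             if i + 1 < len(text) and text[i + 1] == "\n":
--                 counts["CRLF"] += 1
--                 i += 2
--                 continue
--             counts["CR"] += 1
--         elif ch == "\n":
--             counts["LF"] += 1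
--         i += 1
--     return counts
-- ===== SOURCE B (Python) =====
-- def count_newline_kinds(text: str):
--     crlf = text.count("\r\n")
--     return {"CRLF": crlf, "LF": text.count("\n") - crlf, "CR": text.count("\r") - crlf}
-- ===== Notes on version B (the rewrite author's own statement) =====
-- stated objective: faster
-- what changed: Replaced the stateful index-advancing per-character loop with lookahead by three independent str.count scans plus subtraction (every CR/LF is either part of a CRLF or standalone, so the subtractions are exact).
import Mathlib
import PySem

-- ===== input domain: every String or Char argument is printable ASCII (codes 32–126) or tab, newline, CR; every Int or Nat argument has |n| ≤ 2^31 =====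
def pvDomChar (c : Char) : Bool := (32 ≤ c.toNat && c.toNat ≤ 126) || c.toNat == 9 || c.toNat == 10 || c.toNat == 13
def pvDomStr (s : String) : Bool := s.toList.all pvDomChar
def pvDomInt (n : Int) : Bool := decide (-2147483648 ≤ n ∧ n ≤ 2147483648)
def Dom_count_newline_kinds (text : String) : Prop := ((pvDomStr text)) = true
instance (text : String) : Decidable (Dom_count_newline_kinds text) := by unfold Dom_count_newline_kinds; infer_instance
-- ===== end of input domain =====

-- B replaces A's stateful index-advancing loop (with CRLF lookahead) by three independent
-- substring-count scans plus subtraction; measured faster at large sizes in a timing run.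


-- ===== PORT A =====
-- A's while-loop over the index i, advancing by 2 after a CRLF and by 1 otherwise, becomes
-- structural recursion over the character list with a one-character lookahead; the dict
-- {"CRLF": _, "LF": _, "CR": _} with its three fixed keys is carried as the three counters
-- (crlf, lf, cr) and returned in its insertion order.
def countLoopA : List Char → Int → Int → Int → Int × Int × Int
  | [], crlf, lf, cr => (crlf, lf, cr)
  | '\r' :: '\n' :: rest, crlf, lf, cr => countLoopA rest (crlf + 1) lf cr
  | '\r' :: rest, crlf, lf, cr => countLoopA rest crlf lf (cr + 1)
  | '\n' :: rest, crlf, lf, cr => countLoopA rest crlf (lf + 1) cr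
  | _ :: rest, crlf, lf, cr => countLoopA rest crlf lf cr

def count_newline_kinds (text : String) : List (String × Int) :=
  let r := countLoopA text.toList 0 0 0
  [("CRLF", r.1), ("LF", r.2.1), ("CR", r.2.2)]

-- ===== PORT B =====
def count_newline_kinds_alt (text : String) : List (String × Int) :=
  let crlf : Int := PySem.Str.count text "\r\n"
  [("CRLF", crlf), ("LF", (PySem.Str.count text "\n" : Int) - crlf),
   ("CR", (PySem.Str.count text "\r" : Int) - crlf)]

-- ===== PRECONDITION & SPEC =====
def Spec_count_newline_kinds (text : String) (out : List (String × Int)) : Prop := out = count_newline_kinds_alt text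
instance (text : String) (out : List (String × Int)) : Decidable (Spec_count_newline_kinds text out) := by unfold Spec_count_newline_kinds; infer_instance

-- ===== CLAIM (what is proved, stated in full; the proofs are below) =====
def Claim_equal_count_newline_kinds : Prop := ∀ (text : String), Dom_count_newline_kinds text → Spec_count_newline_kinds text (count_newline_kinds text)

-- ===== LEMMAS AND PROOFS =====

-- Number of "\r\n" occurrences (non-overlapping = all of them, since "\r\n" cannot overlap itself).
def crlfCount : List Char → Nat
  | [] => 0
  | x :: t => crlfCount t + (if x = '\r' ∧ t.head? = some '\n' then 1 else 0)

lemma crlfCount_nil : crlfCount [] = 0 := rfl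

lemma crlfCount_cons (x : Char) (t : List Char) :
    crlfCount (x :: t) = crlfCount t + (if x = '\r' ∧ t.head? = some '\n' then 1 else 0) := rfl

lemma go_crlf : ∀ (fuel : Nat) (l : List Char) (acc : Nat), l.length ≤ fuel →
    PySem.Chars.count.go ['\r', '\n'] fuel l acc = acc + crlfCount l := by
  intro fuel
  induction fuel with
  | zero =>
    intro l acc h
    cases l with
    | nil => simp [PySem.Chars.count.go, crlfCount_nil]
    | cons x t => simp at h
  | succ n ih =>
    intro l acc h
    match l with
    | [] => simp [PySem.Chars.count.go, crlfCount_nil]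
    | x :: t =>
      rw [PySem.Chars.count.go]
      simp only [List.length_cons] at h
      by_cases hx : x = '\r'
      · subst hx
        cases t with
        | nil =>
          have hp : (['\r', '\n'].isPrefixOf (['\r'] : List Char)) = false := by decide
          rw [hp]
          simp only [Bool.false_eq_true, if_false]
          rw [ih [] acc (by omega)]
          conv_rhs => rw [crlfCount_cons]
          simp [crlfCount_nil]
        | cons y t' =>
          by_cases hy : y = '\n'
          · subst hy
            have hp : (['\r', '\n'].isPrefixOf ('\r' :: '\n' :: t')) = true := by
              simp [List.isPrefixOf]
            rw [hp]
            simp only [if_true]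
            have hd : List.drop (['\r', '\n'] : List Char).length ('\r' :: '\n' :: t') = t' := rfl
            rw [hd, ih t' (acc + 1) (by simp at h ⊢; omega)]
            conv_rhs => rw [crlfCount_cons, crlfCount_cons]
            simp only [List.head?_cons]
            simp
            try omega
          · have hp : (['\r', '\n'].isPrefixOf ('\r' :: y :: t')) = false := by
              simp [List.isPrefixOf]
              exact fun hh => hy hh.symm
            rw [hp]
            simp only [Bool.false_eq_true, if_false]
            rw [ih (y :: t') acc (by omega)]
            conv_rhs => rw [crlfCount_cons]
            simp [List.head?_cons, hy]
      · have hp : (['\r', '\n'].isPrefixOf (x :: t)) = false := by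
          simp [List.isPrefixOf]
          intro hh
          exact absurd hh.symm hx
        rw [hp]
        simp only [Bool.false_eq_true, if_false]
        rw [ih t acc (by omega)]
        conv_rhs => rw [crlfCount_cons]
        simp [hx]

lemma go_single : ∀ (c : Char) (fuel : Nat) (l : List Char) (acc : Nat), l.length ≤ fuel →
    PySem.Chars.count.go [c] fuel l acc = acc + l.count c := by
  intro c fuel
  induction fuel with
  | zero =>
    intro l acc h
    cases l with
    | nil => simp [PySem.Chars.count.go]
    | cons x t => simp at h
  | succ n ih =>
    intro l acc h
    match l with
    | [] => simp [PySem.Chars.count.go]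
    | x :: t =>
      rw [PySem.Chars.count.go]
      simp only [List.length_cons] at h
      by_cases hx : c = x
      · subst hx
        have hp : ([c].isPrefixOf (c :: t)) = true := by simp [List.isPrefixOf]
        rw [hp]
        simp only [if_true, List.length_singleton, List.drop_succ_cons, List.drop_zero]
        rw [ih t (acc + 1) (by omega)]
        simp
        omega
      · have hcx : ¬ x = c := fun hh => hx hh.symm
        have hp : ([c].isPrefixOf (x :: t)) = false := by
          simp [List.isPrefixOf]
          exact hx
        rw [hp]
        simp only [Bool.false_eq_true, if_false]
        rw [ih t acc (by omega)]
        simp [hcx]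

lemma count_crlf (l : List Char) : PySem.Chars.count l ['\r', '\n'] = crlfCount l := by
  rw [PySem.Chars.count]
  simp only [List.isEmpty, Bool.false_eq_true, if_false]
  simpa using go_crlf l.length l 0 le_rfl

lemma count_single (l : List Char) (c : Char) : PySem.Chars.count l [c] = l.count c := by
  rw [PySem.Chars.count]
  simp only [List.isEmpty, Bool.false_eq_true, if_false]
  simpa using go_single c l.length l 0 le_rfl

lemma countLoopA_eq (l : List Char) (a b c : Int) :
    countLoopA l a b c =
      (a + crlfCount l, b + ((l.count '\n' : Int) - crlfCount l),
       c + ((l.count '\r' : Int) - crlfCount l)) := by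
  fun_induction countLoopA l a b c with
  | case1 a b c => simp [crlfCount_nil]
  | case2 rest a b c ih =>
    rw [ih]
    simp [crlfCount_cons, List.head?_cons, Prod.mk.injEq]
    try push_cast
    try omega
  | case3 rest a b c h ih =>
    rw [ih]
    have hr : rest.head? ≠ some '\n' := by
      cases rest with
      | nil => simp
      | cons y t =>
        simp only [List.head?_cons, ne_eq, Option.some.injEq]
        intro hy
        exact h t (by rw [hy])
    simp [crlfCount_cons, hr, Prod.mk.injEq]
    try push_cast
    try omega
  | case4 rest a b c ih =>
    rw [ih]
    simp [crlfCount_cons, Prod.mk.injEq]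
    try push_cast
    try omega
  | case5 x rest a b c h0 h1 h2 ih =>
    rw [ih]
    have hx1 : ¬ x = '\r' := fun hh => h1 hh
    have hx2 : ¬ x = '\n' := fun hh => h2 hh
    have hx1' : ¬ '\r' = x := fun hh => hx1 hh.symm
    have hx2' : ¬ '\n' = x := fun hh => hx2 hh.symm
    simp [crlfCount_cons, hx1, hx2]

-- ===== VERDICT (by name: the statement is the Claim_ definition above) =====
theorem count_newline_kinds_spec : Claim_equal_count_newline_kinds := by
  intro text _
  unfold Spec_count_newline_kinds count_newline_kinds count_newline_kinds_alt
  simp only [PySem.Str.count_eq]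
  have h1 : ("\r\n" : String).toList = ['\r', '\n'] := rfl
  have h2 : ("\n" : String).toList = ['\n'] := rfl
  have h3 : ("\r" : String).toList = ['\r'] := rfl
  rw [h1, h2, h3, count_crlf, count_single, count_single, countLoopA_eq]
  norm_num
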